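-- pv_equiv track=rewrite | github.com/sandro20450/bichos-app | app.py | detecting_vicio_repeticao
-- ===== SOURCE A (Python) =====
-- def detecting_vicio_repeticao(historico):
--     if len(historico) < 10: return False
--     repeticoes = 0
--     recorte = historico[-15:]
--     for i in range(len(recorte)-1):
--         if recorte[i] == recorte[i+1]:
--             repeticoes += 1
--     return repeticoes >= 2
-- ===== SOURCE B (Python) =====
-- def detecting_vicio_repeticao(historico):
--     if len(historico) < 10: return False
--     recorte = historico[-15:]
--     total = 0
--     run = 1
--     prev = recorte[0]
--     for v in recorte[1:]:
--         if v == prev: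
--             run += 1
--         else:
--             total += run - 1
--             run = 1
--             prev = v
--     return total + run - 1 >= 2
-- ===== Notes on version B (the rewrite author's own statement) =====
-- stated objective: alternative
-- what changed: Replaces the index-pair loop (range over i, comparing recorte[i] with recorte[i+1]) by a run-length decomposition: a single value-driven pass maintaining the current run's length and summing (run length - 1) over maximal runs of equal elements.
import Mathlib
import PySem

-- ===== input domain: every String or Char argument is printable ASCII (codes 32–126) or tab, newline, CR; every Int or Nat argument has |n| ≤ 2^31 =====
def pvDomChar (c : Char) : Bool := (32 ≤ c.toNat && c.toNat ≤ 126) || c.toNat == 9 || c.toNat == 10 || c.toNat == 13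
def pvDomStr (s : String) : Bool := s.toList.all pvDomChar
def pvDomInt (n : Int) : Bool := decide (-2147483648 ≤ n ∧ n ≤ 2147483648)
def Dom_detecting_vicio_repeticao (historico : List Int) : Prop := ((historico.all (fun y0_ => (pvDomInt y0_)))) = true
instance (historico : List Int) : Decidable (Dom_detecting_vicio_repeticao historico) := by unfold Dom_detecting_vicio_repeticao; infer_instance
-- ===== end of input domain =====

-- B replaces A's index-pair counting loop by a single run-length pass (sum of run length - 1 over maximal runs); alternative decomposition, same cost.


-- ===== PORT A =====
def detecting_vicio_repeticao (historico : List Int) : Bool :=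
  if historico.length < 10 then false
  else
    let recorte := PySem.List.slice historico (some (-15)) none
    let repeticoes : Int :=
      (PySem.List.pyRange 0 ((recorte.length : Int) - 1) 1).foldl
        (fun acc i =>
          if PySem.List.pyGetD recorte i 0 = PySem.List.pyGetD recorte (i + 1) 0
          then acc + 1 else acc) 0
    decide (repeticoes ≥ 2)

-- ===== PORT B =====
def detecting_vicio_repeticao_alt (historico : List Int) : Bool :=
  if historico.length < 10 then false
  else
    let recorte := PySem.List.slice historico (some (-15)) none
    match recorte with
    | [] => false   -- unreachable: recorte is nonempty when len(historico) ≥ 10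
    | prev0 :: rest =>
      let st := rest.foldl
        (fun (s : Int × Int × Int) v =>
          if v = s.2.2 then (s.1, s.2.1 + 1, s.2.2)
          else (s.1 + s.2.1 - 1, 1, v))
        ((0 : Int), (1 : Int), prev0)
      decide (st.1 + st.2.1 - 1 ≥ 2)

-- ===== PRECONDITION & SPEC =====
def Spec_detecting_vicio_repeticao (historico : List Int) (out : Bool) : Prop := out = detecting_vicio_repeticao_alt historico
instance (historico : List Int) (out : Bool) : Decidable (Spec_detecting_vicio_repeticao historico out) := by unfold Spec_detecting_vicio_repeticao; infer_instance

-- ===== CLAIM (what is proved, stated in full; the proofs are below) =====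
def Claim_equal_detecting_vicio_repeticao : Prop := ∀ (historico : List Int), Dom_detecting_vicio_repeticao historico → Spec_detecting_vicio_repeticao historico (detecting_vicio_repeticao historico)

-- ===== LEMMAS AND PROOFS =====

/-- number of adjacent equal pairs, structurally -/
def countAdj : List Int → Nat
  | x :: y :: t => (if x = y then 1 else 0) + countAdj (y :: t)
  | _ => 0

lemma countAdj_eq_countP (l : List Int) :
    (List.range (l.length - 1)).countP
      (fun k => decide (l.getD k 0 = l.getD (k + 1) 0)) = countAdj l := by
  induction l with
  | nil => simp [countAdj]
  | cons x t ih =>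
    cases t with
    | nil => simp [countAdj]
    | cons y s =>
      have hlen : (x :: y :: s).length - 1 = ((y :: s).length - 1) + 1 := by
        simp
      rw [hlen, List.range_succ_eq_map]
      simp only [List.countP_cons, List.countP_map]
      rw [countAdj]
      have : (List.countP
          ((fun k => decide ((x :: y :: s).getD k 0 = (x :: y :: s).getD (k + 1) 0)) ∘ Nat.succ)
          (List.range ((y :: s).length - 1)))
          = countAdj (y :: s) := by
        rw [← ih]
        apply List.countP_congr
        intro k _
        simp [Function.comp]
      rw [this]
      by_cases h : x = y <;> simp [h, List.getD] <;> omega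

lemma foldl_runs (xs : List Int) :
    ∀ (total run prev : Int),
    (xs.foldl
      (fun (s : Int × Int × Int) v =>
        if v = s.2.2 then (s.1, s.2.1 + 1, s.2.2)
        else (s.1 + s.2.1 - 1, 1, v)) (total, run, prev)).1 +
    (xs.foldl
      (fun (s : Int × Int × Int) v =>
        if v = s.2.2 then (s.1, s.2.1 + 1, s.2.2)
        else (s.1 + s.2.1 - 1, 1, v)) (total, run, prev)).2.1
    = total + run + (countAdj (prev :: xs) : Int) := by
  induction xs with
  | nil => intro total run prev; simp [countAdj]
  | cons v vs ih =>
    intro total run prev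
    by_cases h : v = prev
    · simp only [List.foldl_cons, h]
      rw [ih]
      rw [countAdj]
      simp
      ring
    · simp only [List.foldl_cons, if_neg h]
      rw [ih]
      rw [countAdj]
      have : prev = v ↔ False := by constructor <;> intro hh <;> simp_all
      simp [this]

-- ===== VERDICT (by name: the statement is the Claim_ definition above) =====
theorem detecting_vicio_repeticao_spec : Claim_equal_detecting_vicio_repeticao := by
  intro historico _
  unfold Spec_detecting_vicio_repeticao detecting_vicio_repeticao detecting_vicio_repeticao_alt
  by_cases hlen : historico.length < 10
  · simp [hlen]
  · simp only [if_neg hlen]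
    set recorte := PySem.List.slice historico (some (-15)) none with hrec
    have hdrop : recorte = historico.drop (historico.length - 15) := by
      rw [hrec, PySem.List.slice_from_neg_ofNat historico 15 (by norm_num)]
    have hne : recorte ≠ [] := by
      rw [hdrop]
      intro hcon
      have := List.length_drop (l := historico) (i := historico.length - 15)
      rw [hcon] at this
      simp at this
      omega
    -- A's fold is a count of adjacent equal indices
    have hA : (PySem.List.pyRange 0 ((recorte.length : Int) - 1) 1).foldl
        (fun acc i =>
          if PySem.List.pyGetD recorte i 0 = PySem.List.pyGetD recorte (i + 1) 0
          then acc + 1 else acc) 0 = (countAdj recorte : Int) := by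
      rw [PySem.List.foldl_ite_add_one]
      rw [PySem.List.pyRange_one]
      simp only [List.countP_map, zero_add, Int.sub_zero]
      rw [show ((recorte.length : Int) - 1).toNat = recorte.length - 1 from by omega]
      rw [← countAdj_eq_countP recorte]
      congr 1
      apply List.countP_congr
      intro k _
      have e1 : PySem.List.pyGetD recorte ((k : Nat) : Int) 0 = recorte.getD k 0 :=
        PySem.List.pyGetD_natCast ..
      have e2 : PySem.List.pyGetD recorte (((k : Nat) : Int) + 1) 0 = recorte.getD (k + 1) 0 := by
        rw [show (((k : Nat) : Int) + 1) = (((k + 1 : Nat) : Nat) : Int) from by push_cast; ring]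
        exact PySem.List.pyGetD_natCast ..
      simp [Function.comp, e1, e2]
    cases hcr : recorte with
    | nil => exact absurd hcr hne
    | cons prev0 rest =>
      rw [hcr] at hA
      have hB := foldl_runs rest 0 1 prev0
      set st := rest.foldl
        (fun (s : Int × Int × Int) v =>
          if v = s.2.2 then (s.1, s.2.1 + 1, s.2.2)
          else (s.1 + s.2.1 - 1, 1, v)) ((0:Int), (1:Int), prev0) with hst
      have hC : st.1 + st.2.1 - 1 = (countAdj (prev0 :: rest) : Int) := by
        rw [hst, hB]; ring
      rw [hA]
      show decide ((countAdj (prev0 :: rest) : Int) ≥ 2) = decide (st.1 + st.2.1 - 1 ≥ 2)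
      rw [hC]
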